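-- pv_equiv track=rewrite | github.com/20113261/platform_service | mioji/spider/expedia/flight_lib.py | process_ages
-- ===== SOURCE A (Python) =====
-- def process_ages(passenger_count, age_info=None):
--     # 处理乘客信息
--     # 返回 adult_count, child_age_list, child_count, has_infant
--     if age_info is None:
--         return passenger_count, [], 0, False
--     age_info_dict = {
--         'adult': 0,
--         'senior': 0,
--         'child': [],
--         'child_count': 0,
--         'has_infant': False,
--     }
--     for age in age_info.split('_'):
--         judge_age(age, age_info_dict)
--
--     test_count = age_info_dict['adult'] + len(age_info_dict['child']) + age_info_dict['senior']
--     assert passenger_count == test_count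
--     return age_info_dict['adult'], age_info_dict['child'], age_info_dict['child_count'], age_info_dict['has_infant']
--
-- def judge_age(age, age_info_dict):
--     # expedia 判定18+都为成人
--     if age == '-1':
--         age_info_dict['adult'] += 1
--         return
--     age_int = int(age)
--     if age_int < 18:
--         # 需要判定是否有婴儿
--         age_info_dict['child'].append(age)
--         age_info_dict['child_count'] += 1
--         #age_info_dict['child_count'] = 0
--         if not age_info_dict['has_infant']:
--             age_info_dict['has_infant'] = is_infant(age_int)
--     elif 18 <= age_int:
--         age_info_dict['adult'] += 1
--
-- def is_infant(age):
--     if 0 <= age < 2: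
--         return True
--     return False
-- ===== SOURCE B (Python) =====
-- def process_ages(passenger_count, age_info=None):
--     # Simpler decomposition: filter tokens into the child list once, derive
--     # adult count by subtraction and has_infant with any() over the children.
--     if age_info is None:
--         return passenger_count, [], 0, False
--     tokens = age_info.split('_')
--     child = [a for a in tokens if a != '-1' and int(a) < 18]
--     adult = len(tokens) - len(child)
--     has_infant = any(0 <= int(a) < 2 for a in child)
--     assert passenger_count == adult + len(child)
--     return adult, child, len(child), has_infant
-- ===== Notes on version B (the rewrite author's own statement) =====
-- stated objective: simpler
-- what changed: Replaces the dict-accumulating loop with helper dispatch by direct filtering passes: child = filter of tokens, adult = len(tokens) - len(child), has_infant = any() over the children.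
import Mathlib
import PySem

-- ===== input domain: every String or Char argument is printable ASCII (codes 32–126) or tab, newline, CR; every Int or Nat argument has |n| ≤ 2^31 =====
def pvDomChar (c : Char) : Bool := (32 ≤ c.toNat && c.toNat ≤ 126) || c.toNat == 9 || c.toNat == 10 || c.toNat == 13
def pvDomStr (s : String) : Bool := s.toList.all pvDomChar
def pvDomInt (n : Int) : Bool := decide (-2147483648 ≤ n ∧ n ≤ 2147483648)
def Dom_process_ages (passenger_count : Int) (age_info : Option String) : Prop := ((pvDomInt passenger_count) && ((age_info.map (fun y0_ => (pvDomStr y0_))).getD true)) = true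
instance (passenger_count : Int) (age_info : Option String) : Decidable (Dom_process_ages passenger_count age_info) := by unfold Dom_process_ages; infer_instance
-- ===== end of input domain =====

-- B replaces A's single accumulating loop (mutable dict + judge_age dispatch) by
-- filtering passes: child = filter, adult = len - len(child), has_infant = any().
-- Objective: simpler.

-- ===== PORT A =====
-- s.split('_'): the separator "_" is nonempty, so split? is always some; getD is never hit
def pvTokens (s : String) : List String := (PySem.Str.split? s "_").getD []

-- state: (adult, senior, child, child_count, has_infant); none = int(age) raised ValueError
def judgeAge (a : String) (st : Int × Int × List String × Int × Bool) :
    Option (Int × Int × List String × Int × Bool) :=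
  if a == "-1" then some (st.1 + 1, st.2.1, st.2.2.1, st.2.2.2.1, st.2.2.2.2)
  else
    match PySem.Int.ofStr? a with
    | none => none
    | some n =>
      if n < 18 then
        some (st.1, st.2.1, st.2.2.1 ++ [a], st.2.2.2.1 + 1,
              st.2.2.2.2 || (decide (0 ≤ n) && decide (n < 2)))
      else if 18 ≤ n then some (st.1 + 1, st.2.1, st.2.2.1, st.2.2.2.1, st.2.2.2.2)
      else some st

def process_ages (passenger_count : Int) (age_info : Option String) : Int × List String × Int × Bool :=
  match age_info with
  | none => (passenger_count, [], 0, false)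
  | some s =>
    match (pvTokens s).foldl (fun acc a => acc.bind (judgeAge a))
        (some (0, 0, [], 0, false)) with
    | none => (0, [], 0, false)  -- int() raised ValueError: excluded by Pre_
    | some (ad, se, ch, cc, inf) =>
      if passenger_count = ad + (ch.length : Int) + se then (ad, ch, cc, inf)
      else (0, [], 0, false)     -- assert failed: excluded by Pre_

-- ===== PORT B =====
-- int(a) on these tokens always succeeds inside Pre_; the getD default is never hit there
def pvIsChild (a : String) : Bool := a ≠ "-1" && ((PySem.Int.ofStr? a).getD 18 < 18)

def pvIsInfantTok (a : String) : Bool :=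
  decide (0 ≤ (PySem.Int.ofStr? a).getD (-1)) && decide ((PySem.Int.ofStr? a).getD (-1) < 2)

def process_ages_alt (passenger_count : Int) (age_info : Option String) : Int × List String × Int × Bool :=
  match age_info with
  | none => (passenger_count, [], 0, false)
  | some s =>
    let tokens := pvTokens s
    let child := tokens.filter pvIsChild
    let adult : Int := (tokens.length : Int) - (child.length : Int)
    let has_infant := child.any pvIsInfantTok
    if passenger_count = adult + (child.length : Int) then (adult, child, (child.length : Int), has_infant)
    else (0, [], 0, false)       -- assert failed: excluded by Pre_

-- ===== PRECONDITION & SPEC =====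
-- Pre_ excludes exactly the inputs where A raises: a token int() cannot parse
-- (ValueError) or a passenger_count that fails the assert (AssertionError).
def Pre_process_ages (passenger_count : Int) (age_info : Option String) : Prop :=
  ∀ s ∈ age_info,
    (∀ a ∈ pvTokens s, (PySem.Int.ofStr? a).isSome) ∧
      passenger_count = ((pvTokens s).length : Int)
instance (passenger_count : Int) (age_info : Option String) : Decidable (Pre_process_ages passenger_count age_info) := by unfold Pre_process_ages; infer_instance

def pvWitness_process_ages : Int × Option String := (3, some "30_5_1")

def Spec_process_ages (passenger_count : Int) (age_info : Option String) (out : Int × List String × Int × Bool) : Prop := out = process_ages_alt passenger_count age_info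
instance (passenger_count : Int) (age_info : Option String) (out : Int × List String × Int × Bool) : Decidable (Spec_process_ages passenger_count age_info out) := by unfold Spec_process_ages; infer_instance

-- ===== CLAIM (what is proved, stated in full; the proofs are below) =====
def Claim_equal_process_ages : Prop := ∀ (passenger_count : Int) (age_info : Option String), Dom_process_ages passenger_count age_info → Pre_process_ages passenger_count age_info → Spec_process_ages passenger_count age_info (process_ages passenger_count age_info)

-- ===== LEMMAS AND PROOFS =====

-- Loop invariant: A's fold over parseable tokens, from any start state, lands on
-- exactly B's filter-based quantities.
theorem foldA_eq (ts : List String) (h : ∀ a ∈ ts, (PySem.Int.ofStr? a).isSome)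
    (ad se : Int) (ch : List String) (cc : Int) (inf : Bool) :
    ts.foldl (fun acc a => acc.bind (judgeAge a)) (some (ad, se, ch, cc, inf)) =
      some (ad + ((ts.length : Int) - ((ts.filter pvIsChild).length : Int)), se,
            ch ++ ts.filter pvIsChild, cc + ((ts.filter pvIsChild).length : Int),
            inf || (ts.filter pvIsChild).any pvIsInfantTok) := by
  induction ts generalizing ad se ch cc inf with
  | nil => simp
  | cons a ts ih =>
    have ha : (PySem.Int.ofStr? a).isSome := h a (by simp)
    have hts : ∀ b ∈ ts, (PySem.Int.ofStr? b).isSome := fun b hb => h b (by simp [hb])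
    obtain ⟨n, hn⟩ := Option.isSome_iff_exists.mp ha
    by_cases h1 : a = "-1"
    · have hpc : pvIsChild a = false := by simp [pvIsChild, h1]
      have hj : judgeAge a (ad, se, ch, cc, inf) = some (ad + 1, se, ch, cc, inf) := by
        simp [judgeAge, h1]
      rw [List.foldl_cons, Option.bind_some, hj, ih hts]
      simp only [List.filter_cons, hpc, Bool.false_eq_true, if_false, List.length_cons]
      refine congrArg some ?_
      refine Prod.ext ?_ rfl
      push_cast; ring
    · have hne : (a == "-1") = false := by simp [h1]
      by_cases h2 : n < 18
      · have hpc : pvIsChild a = true := by simp [pvIsChild, h1, hn, h2]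
        have hj : judgeAge a (ad, se, ch, cc, inf) =
            some (ad, se, ch ++ [a], cc + 1, inf || (decide (0 ≤ n) && decide (n < 2))) := by
          simp [judgeAge, hne, hn, h2]
        rw [List.foldl_cons, Option.bind_some, hj, ih hts]
        have hinf : pvIsInfantTok a = (decide (0 ≤ n) && decide (n < 2)) := by
          simp [pvIsInfantTok, hn]
        simp only [List.filter_cons, hpc, if_true, List.length_cons, List.any_cons, hinf,
          List.append_assoc, List.singleton_append, Option.some.injEq, Prod.mk.injEq]
        refine ⟨by push_cast; omega, trivial, trivial, by push_cast; omega, ?_⟩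
        cases inf <;> simp
      · have hpc : pvIsChild a = false := by simp [pvIsChild, h1, hn, h2]
        have hj : judgeAge a (ad, se, ch, cc, inf) = some (ad + 1, se, ch, cc, inf) := by
          simp [judgeAge, hne, hn, h2]
        rw [List.foldl_cons, Option.bind_some, hj, ih hts]
        simp only [List.filter_cons, hpc, Bool.false_eq_true, if_false, List.length_cons]
        refine congrArg some ?_
        refine Prod.ext ?_ rfl
        push_cast; ring

-- ===== VERDICT (by name: the statement is the Claim_ definition above) =====
theorem process_ages_spec : Claim_equal_process_ages := by
  intro pc ai _hdom hpre
  unfold Spec_process_ages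
  cases ai with
  | none => rfl
  | some s =>
    obtain ⟨hparse, hcount⟩ := hpre s rfl
    simp only [process_ages, process_ages_alt]
    rw [foldA_eq _ hparse]
    simp only [List.nil_append]
    have hle : ((pvTokens s).filter pvIsChild).length ≤ (pvTokens s).length :=
      List.length_filter_le _ _
    have hcond : pc = (0 + (((pvTokens s).length : Int) -
        (((pvTokens s).filter pvIsChild).length : Int)) +
        (((pvTokens s).filter pvIsChild).length : Int) + 0) := by omega
    rw [if_pos hcond, if_pos (by omega)]
    simp
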